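-- pv_equiv track=rewrite | github.com/edwak97/aoc_solutions_25 | day3/sol_part1.py | getBestVal
-- ===== SOURCE A (Python) =====
-- def getBestVal(seq:list):
--     max_reducted_l = [None] * len(seq)
--     max_reducted_r = [None] * len(seq)
--     max_reducted_l[0], max_reducted_r[-1] = seq[0], seq[-1]
--     for i in range(1, len(seq)):
--         max_reducted_l[i] = max(max_reducted_l[i-1], seq[i])
--     for i in range(len(seq) - 2, -1, -1):
--         max_reducted_r[i] = max(max_reducted_r[i+1], seq[i])
--     best_match = 0
--     for i in range(len(seq) - 1):
--         best_0_digit = max_reducted_l[i]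
--         best_1_digit = max_reducted_r[i+1]
--         best_match = max(best_match, best_0_digit * 10 + best_1_digit)
--     return best_match
-- ===== SOURCE B (Python) =====
-- def getBestVal(seq: list):
--     left_max = seq[0]
--     best = 0
--     for v in seq[1:]:
--         best = max(best, left_max * 10 + v)
--         left_max = max(left_max, v)
--     return best
-- ===== Notes on version B (the rewrite author's own statement) =====
-- stated objective: simpler
-- what changed: Replaced the two precomputed prefix/suffix maximum arrays and the separate combining pass with a single forward pass maintaining one running left maximum and the best value so far.
import Mathlib
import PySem

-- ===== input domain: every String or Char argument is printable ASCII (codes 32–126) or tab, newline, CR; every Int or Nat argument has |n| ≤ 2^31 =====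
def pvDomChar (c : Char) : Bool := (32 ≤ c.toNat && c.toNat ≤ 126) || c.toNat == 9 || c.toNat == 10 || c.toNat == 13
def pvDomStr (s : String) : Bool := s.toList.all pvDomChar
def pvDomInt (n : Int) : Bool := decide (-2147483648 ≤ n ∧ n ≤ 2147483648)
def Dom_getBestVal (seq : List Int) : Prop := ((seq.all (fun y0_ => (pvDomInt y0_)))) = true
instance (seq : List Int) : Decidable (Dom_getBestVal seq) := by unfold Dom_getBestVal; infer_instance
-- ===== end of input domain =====

-- B changes A's two prefix/suffix max arrays + combining pass into one forward pass with a
-- running left maximum (objective: simpler). Both Pythons raise IndexError on empty seq (Pre_).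

-- ===== PORT A =====
-- Python's [None]*n is modeled as replicate n 0: the 0 placeholder is always overwritten
-- before being read (indices written left-to-right resp. right-to-left), so values agree.
-- All loop indices are non-negative, so pyGetD/pySetD with non-negative Int indices are exact.
def getBestVal (seq : List Int) : Int :=
  let n : Int := (seq.length : Int)
  -- max_reducted_l[0], max_reducted_r[-1] = seq[0], seq[-1]  (IndexError on empty ⇒ Pre_)
  let l0 := PySem.List.pySetD (List.replicate seq.length (0 : Int)) 0 (PySem.List.pyGetD seq 0 0)
  let r0 := PySem.List.pySetD (List.replicate seq.length (0 : Int)) (-1) (PySem.List.pyGetD seq (-1) 0)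
  let l := (PySem.List.pyRange 1 n 1).foldl
    (fun acc i => PySem.List.pySetD acc i
      (max (PySem.List.pyGetD acc (i - 1) 0) (PySem.List.pyGetD seq i 0))) l0
  let r := (PySem.List.pyRange (n - 2) (-1) (-1)).foldl
    (fun acc i => PySem.List.pySetD acc i
      (max (PySem.List.pyGetD acc (i + 1) 0) (PySem.List.pyGetD seq i 0))) r0
  (PySem.List.pyRange 0 (n - 1) 1).foldl
    (fun best i => max best ((PySem.List.pyGetD l i 0) * 10 + (PySem.List.pyGetD r (i + 1) 0))) 0

-- ===== PORT B =====
def getBestVal_alt (seq : List Int) : Int :=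
  match seq with
  | [] => 0  -- Python: IndexError at seq[0]; excluded by Pre_
  | x :: rest =>
    (rest.foldl (fun st v => (max st.1 v, max st.2 (st.1 * 10 + v))) (x, (0 : Int))).2

-- ===== PRECONDITION & SPEC =====
-- Pre_ excludes only the empty list, on which both Pythons raise IndexError.
def Pre_getBestVal (seq : List Int) : Prop := seq ≠ []
instance (seq : List Int) : Decidable (Pre_getBestVal seq) := by unfold Pre_getBestVal; infer_instance
def pvWitness_getBestVal : List Int := [3, 1, 4, 1, 5]
def Spec_getBestVal (seq : List Int) (out : Int) : Prop := out = getBestVal_alt seq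
instance (seq : List Int) (out : Int) : Decidable (Spec_getBestVal seq out) := by unfold Spec_getBestVal; infer_instance

-- ===== CLAIM (what is proved, stated in full; the proofs are below) =====
def Claim_equal_getBestVal : Prop := ∀ (seq : List Int), Dom_getBestVal seq → Pre_getBestVal seq → Spec_getBestVal seq (getBestVal seq)

-- ===== LEMMAS AND PROOFS =====

-- prefix maximum of x :: xs over the first k elements of xs
def pvPfx (x : Int) (xs : List Int) (k : Nat) : Int := (xs.take k).foldl max x

-- suffix maximum of seq from index k (0 on an empty suffix; only used for k < length)
def pvSfx (seq : List Int) (k : Nat) : Int :=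
  match seq.drop k with
  | [] => 0
  | y :: ys => ys.foldl max y

-- both results are pinned down by the same upper-bound predicate
def pvQ (seq : List Int) (m : Int) : Prop :=
  0 ≤ m ∧ ∀ i j : Nat, i < j → j < seq.length → seq.getD i 0 * 10 + seq.getD j 0 ≤ m

theorem pv_foldl_max_le_iff (L : List Int) (c m : Int) :
    L.foldl max c ≤ m ↔ c ≤ m ∧ ∀ a ∈ L, a ≤ m := by
  induction L generalizing c with
  | nil => simp
  | cons a L ih =>
    rw [List.foldl_cons, ih]
    simp only [List.mem_cons]
    constructor
    · rintro ⟨h1, h2⟩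
      exact ⟨le_trans (le_max_left _ _) h1,
        fun b hb => hb.elim (fun he => he ▸ le_trans (le_max_right _ _) h1) (h2 b)⟩
    · rintro ⟨h1, h2⟩
      exact ⟨max_le h1 (h2 a (Or.inl rfl)), fun b hb => h2 b (Or.inr hb)⟩

theorem pv_foldl_max_mem (L : List Int) (c : Int) : L.foldl max c = c ∨ L.foldl max c ∈ L := by
  induction L generalizing c with
  | nil => simp
  | cons a L ih =>
    rcases ih (max c a) with h | h
    · rcases max_cases c a with ⟨he, _⟩ | ⟨he, _⟩
      · left; simpa [he] using h
      · right; simp [List.foldl_cons]; left; rw [h, he]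
    · right; simp [List.foldl_cons]; right; exact h

theorem pv_foldl_max_comm (L : List Int) (a c : Int) :
    L.foldl max (max a c) = max a (L.foldl max c) := by
  induction L generalizing c with
  | nil => simp
  | cons b L ih => simp [List.foldl_cons, max_assoc, ih]

theorem pvSfx_rec (seq : List Int) (k : Nat) (h : k + 1 < seq.length) :
    pvSfx seq k = max (pvSfx seq (k + 1)) (seq.getD k 0) := by
  have h1 : seq.drop k = seq[k]'(by omega) :: seq.drop (k + 1) := List.drop_eq_getElem_cons (by omega)
  have h2 : seq.drop (k + 1) = seq[k+1]'h :: seq.drop (k + 2) := List.drop_eq_getElem_cons h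
  simp only [pvSfx, h1, h2]
  rw [List.foldl_cons, pv_foldl_max_comm,
      List.getD_eq_getElem seq 0 (by omega : k < seq.length), Int.max_comm]

theorem pvPfx_rec (x : Int) (xs : List Int) (k : Nat) (h : k < xs.length) :
    pvPfx x xs (k + 1) = max (pvPfx x xs k) (xs.getD k 0) := by
  simp only [pvPfx]
  rw [List.take_add_one, List.getElem?_eq_getElem h, List.foldl_append,
      List.getD_eq_getElem xs 0 h]
  simp

-- bound and attainment lemmas for prefix/suffix maxima

theorem pv_le_foldl_max (L : List Int) (c : Int) : c ≤ L.foldl max c :=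
  ((pv_foldl_max_le_iff L c _).1 le_rfl).1

theorem pv_mem_le_foldl_max {a : Int} {L : List Int} (c : Int) (h : a ∈ L) :
    a ≤ L.foldl max c :=
  ((pv_foldl_max_le_iff L c _).1 le_rfl).2 a h

theorem pv_seq_le_pfx (x : Int) (rest : List Int) (i k : Nat)
    (hik : i ≤ k) (_hk : k ≤ rest.length) :
    (x :: rest).getD i 0 ≤ pvPfx x rest k := by
  cases i with
  | zero => simpa using pv_le_foldl_max (rest.take k) x
  | succ i =>
    rw [List.getD_cons_succ]
    have hi : i < rest.length := by omega
    rw [List.getD_eq_getElem rest 0 hi]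
    refine pv_mem_le_foldl_max x ?_
    rw [List.mem_iff_getElem]
    exact ⟨i, by simp [List.length_take]; omega, List.getElem_take⟩

theorem pv_pfx_attain (x : Int) (rest : List Int) (k : Nat) (_hk : k ≤ rest.length) :
    ∃ i : Nat, i ≤ k ∧ pvPfx x rest k = (x :: rest).getD i 0 := by
  rcases pv_foldl_max_mem (rest.take k) x with h | h
  · exact ⟨0, Nat.zero_le _, by simpa [pvPfx] using h⟩
  · rw [List.mem_iff_getElem] at h
    rcases h with ⟨i, hi, hval⟩
    have hi' : i < rest.length := by simp [List.length_take] at hi; omega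
    refine ⟨i + 1, by simp [List.length_take] at hi; omega, ?_⟩
    rw [List.getD_cons_succ, List.getD_eq_getElem rest 0 hi']
    rw [← List.getElem_take (h := hi), hval]
    rfl

theorem pv_seq_le_sfx (seq : List Int) (k j : Nat) (hkj : k ≤ j) (hj : j < seq.length) :
    seq.getD j 0 ≤ pvSfx seq k := by
  have hk : k < seq.length := by omega
  simp only [pvSfx, List.drop_eq_getElem_cons hk]
  rcases Nat.eq_or_lt_of_le hkj with rfl | hlt
  · rw [List.getD_eq_getElem seq 0 hj]; exact pv_le_foldl_max _ _
  · rw [List.getD_eq_getElem seq 0 hj]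
    refine pv_mem_le_foldl_max _ ?_
    rw [List.mem_iff_getElem]
    refine ⟨j - (k + 1), by simp [List.length_drop]; omega, ?_⟩
    rw [List.getElem_drop]
    congr 1; omega

theorem pv_sfx_attain (seq : List Int) (k : Nat) (hk : k < seq.length) :
    ∃ j : Nat, k ≤ j ∧ j < seq.length ∧ pvSfx seq k = seq.getD j 0 := by
  simp only [pvSfx, List.drop_eq_getElem_cons hk]
  rcases pv_foldl_max_mem (seq.drop (k + 1)) (seq[k]'hk) with h | h
  · exact ⟨k, le_rfl, hk, by rw [h, List.getD_eq_getElem seq 0 hk]⟩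
  · rw [List.mem_iff_getElem] at h
    rcases h with ⟨i, hi, hval⟩
    have hi' : k + 1 + i < seq.length := by simp [List.length_drop] at hi; omega
    refine ⟨k + 1 + i, by omega, hi', ?_⟩
    rw [← hval, List.getElem_drop, List.getD_eq_getElem seq 0 hi']

theorem pvPfx_zero (x : Int) (xs : List Int) : pvPfx x xs 0 = x := by simp [pvPfx]

theorem pvPfx_cons_succ (x v : Int) (xs : List Int) (j : Nat) :
    pvPfx x (v :: xs) (j + 1) = pvPfx (max x v) xs j := by
  simp [pvPfx]

-- ===== characterization of B's fold =====

theorem pv_Bfold_le_iff (xs : List Int) (x b m : Int) :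
    (xs.foldl (fun st v => (max st.1 v, max st.2 (st.1 * 10 + v))) (x, b)).2 ≤ m ↔
    b ≤ m ∧ ∀ j : Nat, j < xs.length → pvPfx x xs j * 10 + xs.getD j 0 ≤ m := by
  induction xs generalizing x b with
  | nil => simp
  | cons v xs ih =>
    rw [List.foldl_cons, ih]
    constructor
    · rintro ⟨h1, h2⟩
      refine ⟨le_trans (le_max_left _ _) h1, ?_⟩
      intro j hj
      cases j with
      | zero => simpa [pvPfx_zero] using le_trans (le_max_right _ _) h1
      | succ j =>
        rw [pvPfx_cons_succ, List.getD_cons_succ]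
        exact h2 j (by simpa using hj)
    · rintro ⟨h1, h2⟩
      constructor
      · have h0 := h2 0 (by simp)
        rw [pvPfx_zero] at h0
        simp only [List.getD_cons_zero] at h0
        exact max_le h1 h0
      · intro j hj
        have := h2 (j + 1) (by simpa using Nat.succ_lt_succ hj)
        rwa [pvPfx_cons_succ, List.getD_cons_succ] at this

theorem pv_B_le_iff (seq : List Int) (h : seq ≠ []) (m : Int) :
    getBestVal_alt seq ≤ m ↔ pvQ seq m := by
  match seq with
  | x :: rest =>
    rw [getBestVal_alt, pv_Bfold_le_iff, pvQ]
    constructor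
    · rintro ⟨h0, hterm⟩
      refine ⟨h0, ?_⟩
      intro i j hij hj
      match j, hij with
      | j + 1, hij =>
        have hjr : j < rest.length := by simpa using hj
        have h1 : (x :: rest).getD i 0 ≤ pvPfx x rest j :=
          pv_seq_le_pfx x rest i j (by omega) (by omega)
        have h2 := hterm j hjr
        rw [List.getD_cons_succ]
        omega
    · rintro ⟨h0, hpair⟩
      refine ⟨h0, ?_⟩
      intro j hj
      rcases pv_pfx_attain x rest j (by omega) with ⟨i, hik, hval⟩
      rw [hval]
      have := hpair i (j + 1) (by omega) (by simpa using Nat.succ_lt_succ hj)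
      rwa [List.getD_cons_succ] at this

-- ===== characterization of A's arrays =====

theorem pv_l_loop (x : Int) (rest : List Int) :
    ∀ t : Nat, 1 ≤ t → t ≤ rest.length + 1 →
    (PySem.List.pyRange 1 (t : Int) 1).foldl
      (fun acc i => PySem.List.pySetD acc i
        (max (PySem.List.pyGetD acc (i - 1) 0) (PySem.List.pyGetD (x :: rest) i 0)))
      ((List.range 1).map (fun k => pvPfx x rest k) ++ List.replicate (rest.length + 1 - 1) 0)
    = (List.range t).map (fun k => pvPfx x rest k) ++ List.replicate (rest.length + 1 - t) 0 := by
  intro t h1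
  induction t, h1 using Nat.le_induction with
  | base =>
    intro _
    rw [show ((1 : Nat) : Int) = 1 by simp, PySem.List.pyRange_one_eq_nil le_rfl, List.foldl_nil]
  | succ t h1 ih =>
    intro ht
    obtain ⟨u, rfl⟩ : ∃ u, t = u + 1 := ⟨t - 1, by omega⟩
    have hu : u + 1 ≤ rest.length := by omega
    rw [show (((u + 1 + 1 : Nat)) : Int) = ((u + 1 : Nat) : Int) + 1 by push_cast; ring,
        PySem.List.pyRange_one_succ_right (by exact_mod_cast h1), List.foldl_append,
        ih (by omega), List.foldl_cons, List.foldl_nil]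
    have hgl : PySem.List.pyGetD
        ((List.range (u + 1)).map (fun k => pvPfx x rest k) ++
          List.replicate (rest.length + 1 - (u + 1)) 0)
        (((u + 1 : Nat) : Int) - 1) 0 = pvPfx x rest u := by
      rw [show ((u + 1 : Nat) : Int) - 1 = ((u : Nat) : Int) by push_cast; ring,
          PySem.List.pyGetD_of_nonneg _ _ (by omega), Int.toNat_natCast,
          List.getD_append _ _ _ _ (by simp), PySem.List.getD_map_range _ _ _ _ (by omega)]
    have hgs : PySem.List.pyGetD (x :: rest) ((u + 1 : Nat) : Int) 0 = rest.getD u 0 := by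
      rw [PySem.List.pyGetD_of_nonneg _ _ (by omega), Int.toNat_natCast, List.getD_cons_succ]
    rw [hgl, hgs, ← pvPfx_rec x rest u (by omega),
        PySem.List.pySetD_of_nonneg _ _ (by omega), Int.toNat_natCast, List.set_append,
        if_neg (by simp)]
    simp only [List.length_map, List.length_range, Nat.sub_self]
    rw [show rest.length + 1 - (u + 1) = (rest.length - (u + 1)) + 1 by omega,
        List.replicate_succ, List.set_cons_zero,
        show rest.length + 1 - (u + 1 + 1) = rest.length - (u + 1) by omega]
    conv_rhs => rw [List.range_succ, List.map_append]
    simp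

theorem pv_l_char (x : Int) (rest : List Int) :
    (PySem.List.pyRange 1 ((x :: rest).length : Int) 1).foldl
      (fun acc i => PySem.List.pySetD acc i
        (max (PySem.List.pyGetD acc (i - 1) 0) (PySem.List.pyGetD (x :: rest) i 0)))
      (PySem.List.pySetD (List.replicate (x :: rest).length (0 : Int)) 0
        (PySem.List.pyGetD (x :: rest) 0 0))
    = (List.range (x :: rest).length).map (fun k => pvPfx x rest k) := by
  have hinit : PySem.List.pySetD (List.replicate (x :: rest).length (0 : Int)) 0
      (PySem.List.pyGetD (x :: rest) 0 0)
      = (List.range 1).map (fun k => pvPfx x rest k) ++ List.replicate (rest.length + 1 - 1) 0 := by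
    rw [PySem.List.pyGetD_zero_cons, PySem.List.pySetD_of_nonneg _ _ le_rfl]
    simp [List.replicate_succ, pvPfx_zero]
  rw [hinit, show ((x :: rest).length : Int) = ((rest.length + 1 : Nat) : Int) by simp,
      pv_l_loop x rest (rest.length + 1) (by omega) le_rfl]
  simp

theorem pv_r_loop (x : Int) (rest : List Int) :
    ∀ t : Nat, t ≤ rest.length →
    (PySem.List.pyRange ((t : Int) - 1) (-1) (-1)).foldl
      (fun acc i => PySem.List.pySetD acc i
        (max (PySem.List.pyGetD acc (i + 1) 0) (PySem.List.pyGetD (x :: rest) i 0)))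
      (List.replicate t 0 ++
        (List.range (rest.length + 1 - t)).map (fun k => pvSfx (x :: rest) (t + k)))
    = (List.range (rest.length + 1)).map (fun k => pvSfx (x :: rest) k) := by
  intro t
  induction t with
  | zero =>
    intro _
    rw [show ((0 : Nat) : Int) - 1 = -1 by simp, PySem.List.pyRange_neg_one_eq_nil le_rfl,
        List.foldl_nil]
    simp
  | succ t ih =>
    intro ht
    rw [show (((t + 1 : Nat)) : Int) - 1 = ((t : Nat) : Int) by push_cast; ring,
        PySem.List.pyRange_neg_one_cons (by omega), List.foldl_cons]
    have hga : PySem.List.pyGetD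
        (List.replicate (t + 1) (0 : Int) ++
          (List.range (rest.length + 1 - (t + 1))).map (fun k => pvSfx (x :: rest) (t + 1 + k)))
        (((t : Nat) : Int) + 1) 0 = pvSfx (x :: rest) (t + 1) := by
      rw [show ((t : Nat) : Int) + 1 = ((t + 1 : Nat) : Int) by push_cast; ring,
          PySem.List.pyGetD_of_nonneg _ _ (by omega), Int.toNat_natCast,
          List.getD_append_right _ _ _ _ (by simp)]
      simp only [List.length_replicate, Nat.sub_self]
      rw [PySem.List.getD_map_range _ _ _ _ (by omega)]
    have hgs : PySem.List.pyGetD (x :: rest) ((t : Nat) : Int) 0 = (x :: rest).getD t 0 := by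
      rw [PySem.List.pyGetD_of_nonneg _ _ (by omega), Int.toNat_natCast]
    rw [hga, hgs]
    have hmax := (pvSfx_rec (x :: rest) t (by simp; omega)).symm
    rw [hmax, PySem.List.pySetD_of_nonneg _ _ (by omega), Int.toNat_natCast, List.set_append,
        if_pos (by simp), List.replicate_succ', List.set_append, if_neg (by simp),
        List.length_replicate, Nat.sub_self, List.set_cons_zero, List.append_assoc]
    have hrange : (List.range (rest.length + 1 - t)).map (fun k => pvSfx (x :: rest) (t + k))
        = pvSfx (x :: rest) t ::
          (List.range (rest.length + 1 - (t + 1))).map (fun k => pvSfx (x :: rest) (t + 1 + k)) := by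
      rw [show rest.length + 1 - t = (rest.length + 1 - (t + 1)) + 1 by omega,
          List.range_succ_eq_map, List.map_cons, List.map_map]
      refine congrArg₂ _ (by simp) ?_
      apply List.map_congr_left
      intro k _
      simp only [Function.comp_apply, Nat.succ_eq_add_one]
      congr 1
      omega
    rw [← ih (by omega), hrange]
    rfl

theorem pv_r_char (x : Int) (rest : List Int) :
    (PySem.List.pyRange (((x :: rest).length : Int) - 2) (-1) (-1)).foldl
      (fun acc i => PySem.List.pySetD acc i
        (max (PySem.List.pyGetD acc (i + 1) 0) (PySem.List.pyGetD (x :: rest) i 0)))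
      (PySem.List.pySetD (List.replicate (x :: rest).length (0 : Int)) (-1)
        (PySem.List.pyGetD (x :: rest) (-1) 0))
    = (List.range (x :: rest).length).map (fun k => pvSfx (x :: rest) k) := by
  have hne : (x :: rest) ≠ [] := by simp
  have hlast : pvSfx (x :: rest) rest.length = (x :: rest).getLast hne := by
    simp only [pvSfx,
      List.drop_eq_getElem_cons (show rest.length < (x :: rest).length by simp)]
    rw [List.getLast_eq_getElem]
    simp
  have hinit : PySem.List.pySetD (List.replicate (x :: rest).length (0 : Int)) (-1)
      (PySem.List.pyGetD (x :: rest) (-1) 0)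
      = List.replicate rest.length 0 ++
        (List.range (rest.length + 1 - rest.length)).map
          (fun k => pvSfx (x :: rest) (rest.length + k)) := by
    rw [PySem.List.pyGetD_neg_one _ _ hne]
    simp only [PySem.List.pySetD, PySem.List.pySet?, PySem.List.pyIdx?, List.length_replicate,
      List.length_cons]
    rw [if_neg (by omega), if_pos (by omega)]
    simp only [Option.map_some, Option.getD_some]
    rw [show (-(-1 : Int)).toNat = 1 by decide, show rest.length + 1 - 1 = rest.length by omega,
        show rest.length + 1 - rest.length = 1 by omega,
        show (List.replicate (rest.length + 1) (0 : Int)) =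
          List.replicate rest.length 0 ++ [0] from List.replicate_succ',
        List.set_append, if_neg (by simp), List.length_replicate, Nat.sub_self,
        List.set_cons_zero]
    simp [hlast]
  rw [hinit, show ((x :: rest).length : Int) - 2 = ((rest.length : Nat) : Int) - 1 by
        simp; omega,
      pv_r_loop x rest rest.length le_rfl]
  simp

-- ===== fold with a term function =====

theorem pv_foldl_maxf_le_iff (f : Int → Int) (L : List Int) (c m : Int) :
    L.foldl (fun b i => max b (f i)) c ≤ m ↔ c ≤ m ∧ ∀ i ∈ L, f i ≤ m := by
  induction L generalizing c with
  | nil => simp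
  | cons a L ih =>
    rw [List.foldl_cons, ih]
    simp only [List.mem_cons]
    constructor
    · rintro ⟨h1, h2⟩
      exact ⟨le_trans (le_max_left _ _) h1,
        fun b hb => hb.elim (fun he => he ▸ le_trans (le_max_right _ _) h1) (h2 b)⟩
    · rintro ⟨h1, h2⟩
      exact ⟨max_le h1 (h2 a (Or.inl rfl)), fun b hb => h2 b (Or.inr hb)⟩

-- ===== the two ≤-characterizations =====

theorem pv_A_le_iff (seq : List Int) (h : seq ≠ []) (m : Int) :
    getBestVal seq ≤ m ↔ pvQ seq m := by
  match seq with
  | x :: rest =>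
    rw [getBestVal]
    simp only [pv_l_char x rest, pv_r_char x rest]
    rw [pv_foldl_maxf_le_iff, pvQ]
    have hterm : ∀ i : Int, i ∈ PySem.List.pyRange 0 (((x :: rest).length : Int) - 1) 1 →
        (PySem.List.pyGetD ((List.range (x :: rest).length).map (fun k => pvPfx x rest k)) i 0 * 10
          + PySem.List.pyGetD ((List.range (x :: rest).length).map (fun k => pvSfx (x :: rest) k))
              (i + 1) 0)
        = pvPfx x rest i.toNat * 10 + pvSfx (x :: rest) (i.toNat + 1) := by
      intro i hi
      rw [PySem.List.mem_pyRange_one] at hi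
      have hi1 : i.toNat < rest.length := by simp at hi; omega
      rw [PySem.List.pyGetD_of_nonneg _ _ hi.1,
          PySem.List.getD_map_range _ _ _ _ (by simp; omega),
          PySem.List.pyGetD_of_nonneg _ _ (by omega),
          show (i + 1).toNat = i.toNat + 1 by omega,
          PySem.List.getD_map_range _ _ _ _ (by simp; omega)]
    constructor
    · rintro ⟨h0, hA⟩
      refine ⟨h0, ?_⟩
      intro i j hij hj
      match j, hij with
      | j + 1, hij =>
        have hjr : j < rest.length := by simpa using hj
        have hmem : ((j : Nat) : Int) ∈ PySem.List.pyRange 0 (((x :: rest).length : Int) - 1) 1 := by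
          rw [PySem.List.mem_pyRange_one]; simp; omega
        have hAj := hA _ hmem
        rw [hterm _ hmem, Int.toNat_natCast] at hAj
        have h1 : (x :: rest).getD i 0 ≤ pvPfx x rest j :=
          pv_seq_le_pfx x rest i j (by omega) (by omega)
        have h2 : (x :: rest).getD (j + 1) 0 ≤ pvSfx (x :: rest) (j + 1) :=
          pv_seq_le_sfx (x :: rest) (j + 1) (j + 1) le_rfl hj
        omega
    · rintro ⟨h0, hpair⟩
      refine ⟨h0, ?_⟩
      intro i hi
      rw [hterm i hi]
      rw [PySem.List.mem_pyRange_one] at hi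
      have hi1 : i.toNat < rest.length := by simp at hi; omega
      rcases pv_pfx_attain x rest i.toNat (by omega) with ⟨i0, hi0, hvp⟩
      rcases pv_sfx_attain (x :: rest) (i.toNat + 1) (by simp; omega) with ⟨j0, hj0, hj0l, hvs⟩
      rw [hvp, hvs]
      exact hpair i0 j0 (by omega) hj0l


-- ===== VERDICT (by name: the statement is the Claim_ definition above) =====
theorem getBestVal_spec : Claim_equal_getBestVal := by
  intro seq _ hpre
  unfold Spec_getBestVal
  refine le_antisymm ?_ ?_
  · exact (pv_A_le_iff seq hpre _).2 ((pv_B_le_iff seq hpre _).1 le_rfl)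
  · exact (pv_B_le_iff seq hpre _).2 ((pv_A_le_iff seq hpre _).1 le_rfl)
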